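-- pv_equiv track=rewrite | github.com/YeLiu1110/Bioinformatics_1 | Genome_Sequencing/week4_test.py | Trim1
-- ===== SOURCE A (Python) =====
-- def LinearSpectrum1(Peptide):
--     PrefixMass = [0]
--     for i in range(len(Peptide)):
--         PrefixMass.append(PrefixMass[i] + Peptide[i])
--     Linear = [i for i in Peptide]
--     for i in range(len(Peptide)):
--         for num in range(i+1,len(Peptide)):
--             #import pdb;pdb.set_trace()
--             Linear.append(PrefixMass[num+1] - PrefixMass[i])
--     Linear.insert(0,0)
--     return sorted(Linear)
--
-- def LinearScore1(Peptide, Spectrum):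
--     PeptideSpectrum = LinearSpectrum1(Peptide)
--     setPepSpectrum = set(PeptideSpectrum)
--     score = 0
--     for i in setPepSpectrum:
--         if PeptideSpectrum.count(i) >= Spectrum.count(i):
--             score += Spectrum.count(i)
--         else :
--             score += PeptideSpectrum.count(i)
--     return score
--
-- def Trim1(Leaderboard, Spectrum, N):
--     ScoreList = []
--     for i in range(len(Leaderboard)):
--         Peptide = Leaderboard[i]
--         ScoreList.append(LinearScore1(Peptide,Spectrum))
--     #import pdb;pdb.set_trace()
--     SortPepList = [i for j,i in sorted(zip(ScoreList, Leaderboard),reverse = True)]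
--     SortScoreList = [j for j,i in sorted(zip(ScoreList, Leaderboard),reverse = True)]
--     #import pdb;pdb.set_trace()
--     for i in range(N,len(Leaderboard)):
--         if SortScoreList[i] < SortScoreList[N-1]:
--             return SortPepList[:i]
--     return SortPepList
-- ===== SOURCE B (Python) =====
-- def Trim1(Leaderboard, Spectrum, N):
--     spec_sorted = sorted(Spectrum)
--
--     def score(pep):
--         # all sub-peptide masses via a running sum, plus the empty mass 0
--         sums = [0]
--         n = len(pep)
--         for i in range(n):
--             s = 0
--             for j in range(i, n):
--                 s += pep[j]
--                 sums.append(s)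
--         sums.sort()
--         # multiset-intersection size by a two-pointer merge over the sorted lists
--         k = 0
--         a = 0
--         b = 0
--         while a < len(sums) and b < len(spec_sorted):
--             if sums[a] < spec_sorted[b]:
--                 a += 1
--             elif spec_sorted[b] < sums[a]:
--                 b += 1
--             else:
--                 k += 1
--                 a += 1
--                 b += 1
--         return k
--
--     pairs = [(score(p), p) for p in Leaderboard]
--     pairs.sort(reverse=True)
--     if N >= len(Leaderboard):
--         return [p for _, p in pairs]
--     if N <= 0:
--         return []
--     cutoff = pairs[N - 1][0]
--     return [p for s, p in pairs if s >= cutoff]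
-- ===== Notes on version B (the rewrite author's own statement) =====
-- stated objective: faster
-- what changed: B scores each peptide by generating sub-peptide masses with a running sum (no prefix-mass array), sorting them once and counting the multiset intersection with the pre-sorted Spectrum by a two-pointer merge (A rescans the spectrum with list.count per distinct mass), and trims with a single sort of (score, peptide) pairs plus a cutoff filter instead of A's two full sorts and index scan.
-- intended difference: For N <= 0 with N + len(Leaderboard) >= 1, A's negative index SortScoreList[N-1] wraps around and A returns a nonempty prefix of the sorted leaderboard (the whole leaderboard for N = 0); B returns [], the intended result of trimming to the top N <= 0. — e.g. on Trim1([[1]], [1], 0): A returns [[1]], B returns []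
import Mathlib
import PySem

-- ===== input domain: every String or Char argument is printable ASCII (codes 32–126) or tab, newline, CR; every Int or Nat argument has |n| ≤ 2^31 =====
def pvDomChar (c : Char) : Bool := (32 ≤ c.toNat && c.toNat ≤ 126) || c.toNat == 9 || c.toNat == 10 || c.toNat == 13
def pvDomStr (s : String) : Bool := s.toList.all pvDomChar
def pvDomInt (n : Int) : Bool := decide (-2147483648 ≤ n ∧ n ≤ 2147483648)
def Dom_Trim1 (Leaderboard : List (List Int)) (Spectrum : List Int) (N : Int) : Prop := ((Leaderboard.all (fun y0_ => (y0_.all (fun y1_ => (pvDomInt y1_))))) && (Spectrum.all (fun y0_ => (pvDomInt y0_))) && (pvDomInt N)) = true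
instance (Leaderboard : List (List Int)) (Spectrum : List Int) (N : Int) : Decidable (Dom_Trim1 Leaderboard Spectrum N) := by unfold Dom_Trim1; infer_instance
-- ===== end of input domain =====

-- B generates sub-peptide masses with a running sum, scores by a two-pointer multiset-intersection
-- merge over sorted lists, and trims with one sort plus a cutoff filter; for N <= 0 it returns []
-- where A's negative-index wraparound returns a nonempty prefix (stated as D_ below).


-- ===== PORT A =====
def LinearSpectrum1 (Peptide : List Int) : List Int :=
  let PrefixMass :=
    (PySem.List.pyRange 0 Peptide.length 1).foldl
      (fun pm i => pm ++ [PySem.List.pyGetD pm i 0 + PySem.List.pyGetD Peptide i 0]) [0]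
  let Linear :=
    (PySem.List.pyRange 0 Peptide.length 1).foldl
      (fun acc i =>
        (PySem.List.pyRange (i + 1) Peptide.length 1).foldl
          (fun acc2 num =>
            acc2 ++ [PySem.List.pyGetD PrefixMass (num + 1) 0 - PySem.List.pyGetD PrefixMass i 0])
          acc)
      (Peptide.map (fun i => i))
  PySem.List.sorted (PySem.List.insert Linear 0 0) (fun x => x) false

def LinearScore1 (Peptide : List Int) (Spectrum : List Int) : Int :=
  let PeptideSpectrum := LinearSpectrum1 Peptide
  let setPepSpectrum : PySem.Set Int := PySem.Set.ofList PeptideSpectrum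
  setPepSpectrum.foldl
    (fun score i =>
      if PySem.List.count PeptideSpectrum i ≥ PySem.List.count Spectrum i then
        score + (PySem.List.count Spectrum i : Int)
      else
        score + (PySem.List.count PeptideSpectrum i : Int))
    0

def Trim1 (Leaderboard : List (List Int)) (Spectrum : List Int) (N : Int) : List (List Int) :=
  let ScoreList :=
    (PySem.List.pyRange 0 Leaderboard.length 1).foldl
      (fun acc i => acc ++ [LinearScore1 (PySem.List.pyGetD Leaderboard i []) Spectrum]) []
  let SortPepList :=
    (PySem.List.sorted2 (ScoreList.zip Leaderboard) (fun x => x.1) (fun x => x.2) true).map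
      (fun x => x.2)
  let SortScoreList :=
    (PySem.List.sorted2 (ScoreList.zip Leaderboard) (fun x => x.1) (fun x => x.2) true).map
      (fun x => x.1)
  match (PySem.List.pyRange N Leaderboard.length 1).find?
      (fun i =>
        decide (PySem.List.pyGetD SortScoreList i 0 < PySem.List.pyGetD SortScoreList (N - 1) 0)) with
  | some i => PySem.List.slice SortPepList none (some i)
  | none => SortPepList

-- ===== PORT B =====
-- the while-loop over the two sorted lists, as the obvious structural recursion on the pointers' suffixes
def twoPtrB : List Int → List Int → Int
  | [], _ => 0
  | _ :: _, [] => 0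
  | x :: xs, y :: ys =>
    if x < y then twoPtrB xs (y :: ys)
    else if y < x then twoPtrB (x :: xs) ys
    else 1 + twoPtrB xs ys
termination_by xs ys => xs.length + ys.length

def scoreB (specSorted : List Int) (pep : List Int) : Int :=
  let sums :=
    (PySem.List.pyRange 0 pep.length 1).foldl
      (fun acc i =>
        ((PySem.List.pyRange i pep.length 1).foldl
          (fun (sa : Int × List Int) j =>
            (sa.1 + PySem.List.pyGetD pep j 0, sa.2 ++ [sa.1 + PySem.List.pyGetD pep j 0]))
          (0, acc)).2)
      [0]
  twoPtrB (PySem.List.sorted sums (fun x => x) false) specSorted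

def Trim1_alt (Leaderboard : List (List Int)) (Spectrum : List Int) (N : Int) : List (List Int) :=
  let specSorted := PySem.List.sorted Spectrum (fun x => x) false
  let pairs :=
    PySem.List.sorted2 (Leaderboard.map (fun p => (scoreB specSorted p, p)))
      (fun x => x.1) (fun x => x.2) true
  if N ≥ (Leaderboard.length : Int) then pairs.map (fun x => x.2)
  else if N ≤ 0 then []
  else
    let cutoff := (PySem.List.pyGetD pairs (N - 1) (0, [])).1
    (pairs.filter (fun sp => decide (sp.1 ≥ cutoff))).map (fun x => x.2)

-- ===== PRECONDITION & SPEC =====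
-- Pre_ excludes exactly the inputs on which A raises IndexError (N < len(Leaderboard) and
-- N - 1 < -len(Leaderboard): the negative index SortScoreList[N-1] is out of range); A returns
-- on every input admitted here.
def Pre_Trim1 (Leaderboard : List (List Int)) (Spectrum : List Int) (N : Int) : Prop :=
  N + Leaderboard.length ≥ 1 ∨ N ≥ Leaderboard.length
instance (Leaderboard : List (List Int)) (Spectrum : List Int) (N : Int) : Decidable (Pre_Trim1 Leaderboard Spectrum N) := by unfold Pre_Trim1; infer_instance

def pvWitness_Trim1 : List (List Int) × List Int × Int := ([[1, 2], [3], [1]], [1, 2, 3], 2)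

-- For N ≤ 0 with N + len(Leaderboard) ≥ 1, A's negative index SortScoreList[N-1] wraps around and A
-- returns a nonempty prefix of the sorted leaderboard (the whole leaderboard for N = 0); B returns [],
-- the intended result of trimming to the top N ≤ 0.
def D_Trim1 (Leaderboard : List (List Int)) (Spectrum : List Int) (N : Int) : Prop :=
  N ≤ 0 ∧ N + Leaderboard.length ≥ 1
instance (Leaderboard : List (List Int)) (Spectrum : List Int) (N : Int) : Decidable (D_Trim1 Leaderboard Spectrum N) := by unfold D_Trim1; infer_instance

def Spec_Trim1 (Leaderboard : List (List Int)) (Spectrum : List Int) (N : Int) (out : List (List Int)) : Prop := ¬ D_Trim1 Leaderboard Spectrum N → out = Trim1_alt Leaderboard Spectrum N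
instance (Leaderboard : List (List Int)) (Spectrum : List Int) (N : Int) (out : List (List Int)) : Decidable (Spec_Trim1 Leaderboard Spectrum N out) := by unfold Spec_Trim1; infer_instance

def pvDiffWitness_Trim1 : List (List Int) × List Int × Int := ([[1]], [1], 0)
def pvDiffWitnessOut_Trim1 : (List (List Int)) × (List (List Int)) := ([[1]], [])

-- ===== CLAIM (what is proved, stated in full; the proofs are below) =====
def Claim_unchanged_Trim1 : Prop := ∀ (Leaderboard : List (List Int)) (Spectrum : List Int) (N : Int), Dom_Trim1 Leaderboard Spectrum N → Pre_Trim1 Leaderboard Spectrum N → Spec_Trim1 Leaderboard Spectrum N (Trim1 Leaderboard Spectrum N)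
def Claim_changed_Trim1 : Prop := Dom_Trim1 (pvDiffWitness_Trim1.1) (pvDiffWitness_Trim1.2.1) (pvDiffWitness_Trim1.2.2) ∧ Pre_Trim1 (pvDiffWitness_Trim1.1) (pvDiffWitness_Trim1.2.1) (pvDiffWitness_Trim1.2.2) ∧ D_Trim1 (pvDiffWitness_Trim1.1) (pvDiffWitness_Trim1.2.1) (pvDiffWitness_Trim1.2.2) ∧ Trim1 (pvDiffWitness_Trim1.1) (pvDiffWitness_Trim1.2.1) (pvDiffWitness_Trim1.2.2) = pvDiffWitnessOut_Trim1.1 ∧ Trim1_alt (pvDiffWitness_Trim1.1) (pvDiffWitness_Trim1.2.1) (pvDiffWitness_Trim1.2.2) = pvDiffWitnessOut_Trim1.2 ∧ pvDiffWitnessOut_Trim1.1 ≠ pvDiffWitnessOut_Trim1.2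
def Claim_exact_Trim1 : Prop := ∀ (Leaderboard : List (List Int)) (Spectrum : List Int) (N : Int), Dom_Trim1 Leaderboard Spectrum N → Pre_Trim1 Leaderboard Spectrum N → D_Trim1 Leaderboard Spectrum N → Trim1 Leaderboard Spectrum N ≠ Trim1_alt Leaderboard Spectrum N

-- ===== LEMMAS AND PROOFS =====

-- canonical prefix-mass list: pmS pep = [sum of first k elements | k = 0..len]
def pmS (pep : List Int) : List Int :=
  (List.range (pep.length + 1)).map (fun k => (pep.take k).sum)

-- pyGetD view of pmS
def pvG (pep : List Int) (j : Int) : Int := PySem.List.pyGetD (pmS pep) j 0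

-- the mass list A's double loop produces (with pmS in place of A's accumulator)
def innerA (pep : List Int) (i : Int) : List Int :=
  (PySem.List.pyRange (i + 1) pep.length 1).map (fun num => pvG pep (num + 1) - pvG pep i)

def LA (pep : List Int) : List Int :=
  pep ++ (PySem.List.pyRange 0 pep.length 1).flatMap (innerA pep)

-- the mass list both programs' double loops generate
def LB (pep : List Int) : List Int :=
  (PySem.List.pyRange 0 pep.length 1).flatMap
    (fun i => (PySem.List.pyRange (i + 1) (pep.length + 1) 1).map (fun j => pvG pep j - pvG pep i))

-- the common score value both programs compute
def scoreSpec (pep Spec : List Int) : Int :=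
  ((PySem.Set.ofList (0 :: LB pep)).map
    (fun x => min ((List.count x (0 :: LB pep) : Int)) ((List.count x Spec : Int)))).sum

theorem pmS_append (pep : List Int) (a : Int) :
    pmS (pep ++ [a]) = pmS pep ++ [pep.sum + a] := by
  simp only [pmS, List.length_append, List.length_singleton]
  rw [show pep.length + 1 + 1 = (pep.length + 1) + 1 by ring, List.range_succ, List.map_append]
  congr 1
  · apply List.map_congr_left
    intro k hk
    simp only [List.mem_range] at hk
    rw [List.take_append_of_le_length (by omega)]
  · simp

theorem pvG_natCast (pep : List Int) (k : Nat) (hk : k ≤ pep.length) :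
    pvG pep (k : Int) = (pep.take k).sum := by
  simp only [pvG, PySem.List.pyGetD_natCast]
  rw [List.getD_eq_getElem _ _ (by simp [pmS]; omega)]
  simp [pmS]

theorem pmA_eq (pep : List Int) :
    (PySem.List.pyRange 0 pep.length 1).foldl
      (fun pm i => pm ++ [PySem.List.pyGetD pm i 0 + PySem.List.pyGetD pep i 0]) [0]
    = pmS pep := by
  induction pep using List.reverseRecOn with
  | nil => simp [pmS, PySem.List.pyRange_one_eq_nil]
  | append_singleton l a ih =>
    have hlen : ((l ++ [a]).length : Int) = (l.length : Int) + 1 := by simp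
    rw [hlen, PySem.List.pyRange_one_succ_right (by positivity), List.foldl_append]
    have hcongr :
        (PySem.List.pyRange 0 l.length 1).foldl
          (fun pm i => pm ++ [PySem.List.pyGetD pm i 0 + PySem.List.pyGetD (l ++ [a]) i 0]) [0]
        = (PySem.List.pyRange 0 l.length 1).foldl
          (fun pm i => pm ++ [PySem.List.pyGetD pm i 0 + PySem.List.pyGetD l i 0]) [0] := by
      apply PySem.List.foldl_congr_mem
      intro acc x hx
      rw [PySem.List.mem_pyRange_one] at hx
      have hgd : PySem.List.pyGetD (l ++ [a]) x 0 = PySem.List.pyGetD l x 0 := by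
        rw [PySem.List.pyGetD_eq_getElem _ _ hx.1 (by simp; omega),
          PySem.List.pyGetD_eq_getElem _ _ hx.1 (by omega),
          List.getElem_append_left]
      rw [hgd]
    rw [hcongr, ih, List.foldl_cons, List.foldl_nil]
    have h1 : PySem.List.pyGetD (pmS l) (l.length : Int) 0 = l.sum := by
      have := pvG_natCast l l.length le_rfl
      simpa [pvG, List.take_length] using this
    have h2 : PySem.List.pyGetD (l ++ [a]) (l.length : Int) 0 = a := by
      rw [PySem.List.pyGetD_eq_getElem _ _ (by positivity) (by simp)]
      simp
    rw [h1, h2, pmS_append]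

-- interleaving permutation: flatMap of (g i :: f i) is a permutation of map g ++ flatMap f
theorem flatMap_cons_perm {ι α : Type} (l : List ι) (g : ι → α) (f : ι → List α) :
    (l.flatMap (fun i => g i :: f i)).Perm (l.map g ++ l.flatMap f) := by
  induction l with
  | nil => simp
  | cons a l ih =>
    simp only [List.flatMap_cons, List.map_cons, List.cons_append]
    refine List.Perm.cons _ ?_
    refine (ih.append_left (f a)).trans ?_
    rw [← List.append_assoc, ← List.append_assoc]
    exact (List.perm_append_comm (l₁ := f a) (l₂ := l.map g)).append_right _

theorem pyRange_shift (a b : Int) :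
    PySem.List.pyRange (a + 1) (b + 1) 1 = (PySem.List.pyRange a b 1).map (· + 1) := by
  rw [PySem.List.pyRange_one, PySem.List.pyRange_one, List.map_map]
  have : b + 1 - (a + 1) = b - a := by ring
  rw [this]
  apply List.map_congr_left
  intro k _
  simp; ring

theorem map_delta (pep : List Int) :
    (PySem.List.pyRange 0 pep.length 1).map (fun i => pvG pep (i + 1) - pvG pep i) = pep := by
  rw [PySem.List.pyRange_one, List.map_map]
  apply List.ext_getElem
  · simp
  · intro k h1 h2
    simp only [List.getElem_map, List.getElem_range, Function.comp_apply]
    simp only [List.length_map, List.length_range] at h1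
    have hk : k < pep.length := by omega
    have e1 : (0 : Int) + (k : Int) + 1 = ((k + 1 : Nat) : Int) := by push_cast; ring
    have e2 : (0 : Int) + (k : Int) = ((k : Nat) : Int) := by ring
    rw [e1, e2, pvG_natCast pep (k+1) (by omega), pvG_natCast pep k (by omega),
      List.sum_take_succ _ _ hk]
    ring

theorem LB_perm_LA (pep : List Int) : (LB pep).Perm (LA pep) := by
  have hsplit : LB pep = (PySem.List.pyRange 0 pep.length 1).flatMap
      (fun i => (pvG pep (i + 1) - pvG pep i) :: innerA pep i) := by
    apply List.flatMap_congr
    intro i hi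
    rw [PySem.List.mem_pyRange_one] at hi
    rw [PySem.List.pyRange_one_cons (by omega), List.map_cons]
    congr 1
    have : (i + 1) + 1 = i + 2 := by ring
    rw [show (PySem.List.pyRange (i + 1 + 1) ((pep.length : Int) + 1) 1)
          = (PySem.List.pyRange (i + 1) (pep.length : Int) 1).map (· + 1) from
        pyRange_shift (i + 1) (pep.length : Int), List.map_map]
    rfl
  rw [hsplit]
  have := flatMap_cons_perm (PySem.List.pyRange 0 pep.length 1)
    (fun i => pvG pep (i + 1) - pvG pep i) (innerA pep)
  refine this.trans ?_
  rw [map_delta]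
  exact List.Perm.refl _

theorem linspec_perm (pep : List Int) : (LinearSpectrum1 pep).Perm (0 :: LB pep) := by
  unfold LinearSpectrum1
  dsimp only
  rw [pmA_eq]
  have hinner : ∀ (acc : List Int), ∀ i ∈ PySem.List.pyRange 0 (pep.length : Int) 1,
      (PySem.List.pyRange (i + 1) (pep.length : Int) 1).foldl
        (fun acc2 num =>
          acc2 ++ [PySem.List.pyGetD (pmS pep) (num + 1) 0 - PySem.List.pyGetD (pmS pep) i 0])
        acc
      = acc ++ innerA pep i := by
    intro acc i _
    exact PySem.List.foldl_append_singleton_eq_map _ _ _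
  rw [PySem.List.foldl_congr_mem _ _ _ _ hinner,
    PySem.List.foldl_append_eq_flatMap (innerA pep) _ _]
  have hmapid : pep.map (fun i => i) = pep := List.map_id pep
  rw [hmapid, PySem.List.insert_zero]
  refine (PySem.List.sorted_perm _ _ _).trans ?_
  exact List.Perm.cons 0 (LB_perm_LA pep).symm

theorem scoreA_eq (pep Spec : List Int) : LinearScore1 pep Spec = scoreSpec pep Spec := by
  unfold LinearScore1
  dsimp only
  have hperm := linspec_perm pep
  have hcongr : ∀ (score : Int), ∀ i ∈ PySem.Set.ofList (LinearSpectrum1 pep),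
      (if PySem.List.count (LinearSpectrum1 pep) i ≥ PySem.List.count Spec i then
        score + (PySem.List.count Spec i : Int)
      else score + (PySem.List.count (LinearSpectrum1 pep) i : Int))
      = score + min ((List.count i (0 :: LB pep) : Int)) ((List.count i Spec : Int)) := by
    intro score i _
    have hc : PySem.List.count (LinearSpectrum1 pep) i = List.count i (0 :: LB pep) := by
      simp only [PySem.List.count]
      exact hperm.count_eq i
    simp only [PySem.List.count] at *
    rw [hc]
    split_ifs with h <;> omega
  rw [PySem.List.foldl_congr_mem _ _ _ _ hcongr, PySem.List.foldl_add]
  have hsets : (PySem.Set.ofList (LinearSpectrum1 pep)).Perm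
      (PySem.Set.ofList (0 :: LB pep)) := by
    rw [List.perm_ext_iff_of_nodup (PySem.Set.nodup_ofList _) (PySem.Set.nodup_ofList _)]
    intro a
    rw [PySem.Set.mem_ofList, PySem.Set.mem_ofList]
    exact ⟨fun h => hperm.mem_iff.mp h, fun h => hperm.mem_iff.mpr h⟩
  have := (hsets.map
    (fun i => min ((List.count i (0 :: LB pep) : Int)) ((List.count i Spec : Int)))).sum_eq
  rw [scoreSpec]
  omega

-- ===== B-side lemmas =====

-- the inner running-sum loop of B, characterised against the canonical prefix sums
theorem innerB_eq (pep : List Int) (i : Int) (hi : 0 ≤ i) (k : Nat)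
    (hk : i + k ≤ (pep.length : Int)) (s0 : Int) (acc : List Int) :
    (PySem.List.pyRange i (i + k) 1).foldl
      (fun (sa : Int × List Int) j =>
        (sa.1 + PySem.List.pyGetD pep j 0, sa.2 ++ [sa.1 + PySem.List.pyGetD pep j 0]))
      (s0, acc)
    = (s0 + (pvG pep (i + k) - pvG pep i),
       acc ++ (PySem.List.pyRange i (i + k) 1).map (fun j => s0 + (pvG pep (j + 1) - pvG pep i))) := by
  induction k with
  | zero => simp [PySem.List.pyRange_one_eq_nil le_rfl]
  | succ k ih =>
    have hk' : i + k ≤ (pep.length : Int) := by push_cast at hk ⊢; omega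
    have hcast : i + ((k + 1 : Nat) : Int) = (i + k) + 1 := by push_cast; ring
    rw [hcast, PySem.List.pyRange_one_succ_right (by omega), List.foldl_append, ih hk',
      List.foldl_cons, List.foldl_nil, List.map_append]
    have hget : PySem.List.pyGetD pep (i + k) 0 = pvG pep (i + k + 1) - pvG pep (i + k) := by
      obtain ⟨m, hm⟩ : ∃ m : Nat, i + (k : Int) = (m : Int) := ⟨(i + k).toNat, by omega⟩
      have hmlt : m < pep.length := by omega
      rw [hm, PySem.List.pyGetD_eq_getElem _ _ (by omega) (by exact_mod_cast hmlt),
        show (m : Int) + 1 = ((m + 1 : Nat) : Int) by push_cast; ring,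
        pvG_natCast pep (m + 1) (by omega), pvG_natCast pep m (by omega),
        List.sum_take_succ _ _ hmlt]
      simp
    rw [hget]
    have hval : s0 + (pvG pep (i + k) - pvG pep i) + (pvG pep (i + k + 1) - pvG pep (i + k))
        = s0 + (pvG pep (i + k + 1) - pvG pep i) := by ring
    rw [Prod.ext_iff]
    exact ⟨by dsimp only; ring, by dsimp only; rw [hval, List.append_assoc]; simp⟩

-- B's whole generation phase builds exactly 0 :: LB pep
theorem sumsB_eq (pep : List Int) :
    (PySem.List.pyRange 0 pep.length 1).foldl
      (fun acc i =>
        ((PySem.List.pyRange i pep.length 1).foldl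
          (fun (sa : Int × List Int) j =>
            (sa.1 + PySem.List.pyGetD pep j 0, sa.2 ++ [sa.1 + PySem.List.pyGetD pep j 0]))
          (0, acc)).2)
      [0]
    = 0 :: LB pep := by
  have hbody : ∀ (acc : List Int), ∀ i ∈ PySem.List.pyRange 0 (pep.length : Int) 1,
      ((PySem.List.pyRange i (pep.length : Int) 1).foldl
        (fun (sa : Int × List Int) j =>
          (sa.1 + PySem.List.pyGetD pep j 0, sa.2 ++ [sa.1 + PySem.List.pyGetD pep j 0]))
        (0, acc)).2
      = acc ++ (PySem.List.pyRange (i + 1) ((pep.length : Int) + 1) 1).map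
          (fun j => pvG pep j - pvG pep i) := by
    intro acc i hi
    rw [PySem.List.mem_pyRange_one] at hi
    have hlen : (pep.length : Int) = i + ((pep.length : Int) - i).toNat := by omega
    rw [hlen, innerB_eq pep i hi.1 _ (by omega) 0 acc]
    dsimp only
    congr 1
    rw [show i + 1 = i + 1 by rfl,
      show i + (((pep.length : Int) - i).toNat : Int) + 1
        = (i + ((pep.length : Int) - i).toNat) + 1 by ring,
      pyRange_shift i _, List.map_map]
    apply List.map_congr_left
    intro j _
    simp
  rw [PySem.List.foldl_congr_mem _ _ _ _ hbody,
    PySem.List.foldl_append_eq_flatMap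
      (fun i => (PySem.List.pyRange (i + 1) ((pep.length : Int) + 1) 1).map
        (fun j => pvG pep j - pvG pep i)) _ _]
  rfl

-- multiset-intersection steps used by the two-pointer merge
theorem inter_cons_left_of_not_mem {s t : Multiset Int} {x : Int} (h : x ∉ t) :
    (x ::ₘ s) ∩ t = s ∩ t := by
  ext a
  by_cases hax : a = x
  · subst hax
    simp [Multiset.count_inter, Multiset.count_eq_zero.mpr h]
  · simp [Multiset.count_inter, Multiset.count_cons_of_ne hax]

theorem inter_cons_right_of_not_mem {s t : Multiset Int} {y : Int} (h : y ∉ s) :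
    s ∩ (y ::ₘ t) = s ∩ t := by
  ext a
  by_cases hay : a = y
  · subst hay
    simp [Multiset.count_inter, Multiset.count_eq_zero.mpr h]
  · simp [Multiset.count_inter, Multiset.count_cons_of_ne hay]

theorem inter_cons_cons (s t : Multiset Int) (x : Int) :
    (x ::ₘ s) ∩ (x ::ₘ t) = x ::ₘ (s ∩ t) := by
  ext a
  by_cases hax : a = x
  · subst hax
    simp only [Multiset.count_inter, Multiset.count_cons_self]
    omega
  · simp [Multiset.count_inter, Multiset.count_cons_of_ne hax]

-- the two-pointer merge over two sorted lists computes the multiset-intersection size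
theorem twoPtr_card (xs ys : List Int) (hx : List.Pairwise (· ≤ ·) xs)
    (hy : List.Pairwise (· ≤ ·) ys) :
    twoPtrB xs ys = (((xs : Multiset Int) ∩ (ys : Multiset Int)).card : Int) := by
  induction xs, ys using twoPtrB.induct with
  | case1 ys => simp [twoPtrB]
  | case2 x xs => simp [twoPtrB]
  | case3 x xs y ys h ih =>
    rcases List.pairwise_cons.mp hx with ⟨hx1, hx2⟩
    have hnm : x ∉ (((y :: ys) : List Int) : Multiset Int) := by
      simp only [Multiset.mem_coe, List.mem_cons]
      rintro (rfl | hm)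
      · exact absurd h (lt_irrefl _)
      · exact absurd h (not_lt_of_ge (List.rel_of_pairwise_cons hy hm))
    have hint : (((x :: xs) : List Int) : Multiset Int) ∩ (((y :: ys) : List Int) : Multiset Int)
        = ((xs : List Int) : Multiset Int) ∩ (((y :: ys) : List Int) : Multiset Int) := by
      rw [← Multiset.cons_coe (a := x) (l := xs)]
      exact inter_cons_left_of_not_mem hnm
    rw [show twoPtrB (x :: xs) (y :: ys) = twoPtrB xs (y :: ys) by rw [twoPtrB]; simp [h]]
    rw [ih hx2 hy, hint]
  | case4 x xs y ys h1 h2 ih =>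
    rcases List.pairwise_cons.mp hy with ⟨hy1, hy2⟩
    have hnm : y ∉ (((x :: xs) : List Int) : Multiset Int) := by
      simp only [Multiset.mem_coe, List.mem_cons]
      rintro (rfl | hm)
      · exact absurd h2 (lt_irrefl _)
      · exact absurd h2 (not_lt_of_ge (List.rel_of_pairwise_cons hx hm))
    have hint : (((x :: xs) : List Int) : Multiset Int) ∩ (((y :: ys) : List Int) : Multiset Int)
        = (((x :: xs) : List Int) : Multiset Int) ∩ ((ys : List Int) : Multiset Int) := by
      rw [← Multiset.cons_coe (a := y) (l := ys)]
      exact inter_cons_right_of_not_mem hnm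
    rw [show twoPtrB (x :: xs) (y :: ys) = twoPtrB (x :: xs) ys by rw [twoPtrB]; simp [h1, h2]]
    rw [ih hx hy2, hint]
  | case5 x xs y ys h1 h2 ih =>
    rcases List.pairwise_cons.mp hx with ⟨hx1, hx2⟩
    rcases List.pairwise_cons.mp hy with ⟨hy1, hy2⟩
    have hxy : x = y := le_antisymm (not_lt.mp h2) (not_lt.mp h1)
    subst hxy
    have hint : (((x :: xs) : List Int) : Multiset Int) ∩ (((x :: ys) : List Int) : Multiset Int)
        = x ::ₘ (((xs : List Int) : Multiset Int) ∩ ((ys : List Int) : Multiset Int)) := by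
      rw [← Multiset.cons_coe (a := x) (l := xs), ← Multiset.cons_coe (a := x) (l := ys)]
      exact inter_cons_cons _ _ _
    rw [show twoPtrB (x :: xs) (x :: ys) = 1 + twoPtrB xs ys by rw [twoPtrB]; simp [h1, h2]]
    rw [ih hx2 hy2, hint, Multiset.card_cons]
    push_cast
    ring

-- the common score is the multiset-intersection size
theorem scoreSpec_eq_card (pep Spec : List Int) :
    scoreSpec pep Spec
    = (((((0 :: LB pep) : List Int) : Multiset Int) ∩ ((Spec : List Int) : Multiset Int)).card : Int) := by
  unfold scoreSpec
  set l := (0 :: LB pep : List Int) with hl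
  set T : Multiset Int := (l : Multiset Int) ∩ (Spec : Multiset Int) with hT
  have hpt : ∀ x ∈ PySem.Set.ofList l,
      min ((List.count x l : Int)) ((List.count x Spec : Int))
      = ((Multiset.count x T : Nat) : Int) := by
    intro x _
    rw [hT, Multiset.count_inter, Multiset.coe_count, Multiset.coe_count, Nat.cast_min]
  rw [List.map_congr_left hpt, show (fun x => ((Multiset.count x T : Nat) : Int))
      = (Nat.cast ∘ fun x => Multiset.count x T) from rfl,
    ← List.map_map, ← Nat.cast_list_sum]
  congr 1
  rw [← List.sum_toFinset _ (PySem.Set.nodup_ofList l)]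
  have hfinset : T.toFinset ⊆ (PySem.Set.ofList l).toFinset := by
    intro x hxT
    rw [Multiset.mem_toFinset] at hxT
    rw [List.mem_toFinset, PySem.Set.mem_ofList]
    exact Multiset.mem_coe.mp (Multiset.mem_of_le Multiset.inter_le_left hxT)
  rw [← Finset.sum_subset hfinset (fun x _ hxn => by
    rw [Multiset.count_eq_zero]
    intro hmem
    exact hxn (Multiset.mem_toFinset.mpr hmem))]
  exact Multiset.toFinset_sum_count_eq T

theorem scoreB_eq (Spec pep : List Int) :
    scoreB (PySem.List.sorted Spec (fun x => x) false) pep = scoreSpec pep Spec := by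
  unfold scoreB
  dsimp only
  rw [sumsB_eq]
  have hx : List.Pairwise (· ≤ ·) (PySem.List.sorted (0 :: LB pep) (fun x => x) false) :=
    PySem.List.sorted_pairwise (0 :: LB pep) (fun x => x)
  have hy : List.Pairwise (· ≤ ·) (PySem.List.sorted Spec (fun x => x) false) :=
    PySem.List.sorted_pairwise Spec (fun x => x)
  rw [twoPtr_card _ _ hx hy,
    Multiset.coe_eq_coe.mpr (PySem.List.sorted_perm (0 :: LB pep) (fun x => x) false),
    Multiset.coe_eq_coe.mpr (PySem.List.sorted_perm Spec (fun x => x) false),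
    scoreSpec_eq_card]

-- ===== trim-side lemmas =====

def takeGeB (cutoff : Int) : List (Int × List Int) → List (List Int)
  | [] => []
  | (s, p) :: rest => if s < cutoff then [] else p :: takeGeB cutoff rest

theorem takeGeB_eq (c : Int) (r : List (Int × List Int)) :
    takeGeB c r = (r.map (fun x => x.2)).take (r.findIdx (fun x => decide (x.1 < c))) := by
  induction r with
  | nil => rfl
  | cons a rest ih =>
    obtain ⟨s, p⟩ := a
    rw [takeGeB, List.findIdx_cons]
    by_cases h : s < c
    · simp [h]
    · simp only [h, decide_false, cond_false, List.map_cons, List.take_succ_cons, if_false]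
      rw [ih]

-- on a score-descending list, A's prefix-to-first-below-cutoff is B's filter-by-cutoff
theorem takeGeB_filter (c : Int) (r : List (Int × List Int))
    (hp : r.Pairwise (fun a b => b.1 ≤ a.1)) :
    takeGeB c r = (r.filter (fun sp => decide (sp.1 ≥ c))).map (fun x => x.2) := by
  induction r with
  | nil => rfl
  | cons a rest ih =>
    rcases List.pairwise_cons.mp hp with ⟨h1, h2⟩
    obtain ⟨s, p⟩ := a
    rw [takeGeB]
    by_cases h : s < c
    · rw [if_pos h]
      have hrest : rest.filter (fun sp => decide (sp.1 ≥ c)) = [] := by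
        rw [List.filter_eq_nil_iff]
        intro z hz
        have := h1 z hz
        simp only [ge_iff_le, decide_eq_true_eq]
        omega
      simp [List.filter_cons, h, hrest, show ¬ (c ≤ s) by omega]
    · rw [if_neg h, List.filter_cons_of_pos (by simp; omega), List.map_cons, ih h2]

-- the heart of the trim: A's scan-from-N with negative indices, reduced to takeGeB at the cutoff
theorem trim_core (r : List (Int × List Int)) (N : Int)
    (hp : r.Pairwise (fun a b => b.1 ≤ a.1))
    (hpre : N + r.length ≥ 1 ∨ N ≥ r.length) :
    (match (PySem.List.pyRange N r.length 1).find?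
        (fun i =>
          decide (PySem.List.pyGetD (r.map (fun x => x.1)) i 0 <
            PySem.List.pyGetD (r.map (fun x => x.1)) (N - 1) 0)) with
      | some i => PySem.List.slice (r.map (fun x => x.2)) none (some i)
      | none => r.map (fun x => x.2))
    = if N ≥ (r.length : Int) then r.map (fun x => x.2)
      else takeGeB ((PySem.List.pyGetD r (N - 1) (0, [])).1) r := by
  by_cases hN : N ≥ (r.length : Int)
  · rw [if_pos hN, PySem.List.pyRange_one_eq_nil hN, List.find?_nil]
  · rw [if_neg hN]
    push_neg at hN
    have hlow : 1 ≤ N + r.length := by rcases hpre with h | h <;> omega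
    set s : List Int := r.map (fun x => x.1) with hs_def
    have hslen : s.length = r.length := by simp [hs_def]
    set cutoff : Int := PySem.List.pyGetD s (N - 1) 0 with hcut_def
    have hcut_pair : (PySem.List.pyGetD r (N - 1) ((0 : Int), ([] : List Int))).1 = cutoff := by
      rw [hcut_def, hs_def]
      simpa using (PySem.List.pyGetD_map (fun x => x.1) r (N - 1) (0, [])).symm
    set k : Nat := s.findIdx (fun v => decide (v < cutoff)) with hk_def
    have hkle : k ≤ r.length := by rw [hk_def, ← hslen]; exact List.findIdx_le_length
    have hnot : ∀ j : Nat, j < k → ∀ hj : j < s.length, ¬ (s[j] < cutoff) := by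
      intro j hj hjs
      have h1 : j < s.findIdx (fun v => decide (v < cutoff)) := hk_def ▸ hj
      have := List.not_of_lt_findIdx h1
      simp only [decide_eq_false_iff_not] at this
      exact this
    have hyes : ∀ hks : k < s.length, s[k] < cutoff := by
      intro hks
      have h1 : s.findIdx (fun v => decide (v < cutoff)) < s.length := hk_def ▸ hks
      have := List.findIdx_getElem (w := h1)
      simp only [decide_eq_true_eq] at this
      exact this
    have hps : s.Pairwise (fun a b => b ≤ a) := by
      rw [hs_def]; exact List.pairwise_map.mpr hp
    have hmono : ∀ i j : Nat, i ≤ j → ∀ hj : j < s.length, ∀ hi : i < s.length, s[j] ≤ s[i] := by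
      intro i j hij hj hi
      rcases Nat.eq_or_lt_of_le hij with h | h
      · subst h; exact le_rfl
      · exact List.pairwise_iff_getElem.mp hps i j hi hj h
    have hB : takeGeB cutoff r = (r.map (fun x => x.2)).take k := by
      rw [takeGeB_eq]
      congr 1
      rw [hk_def, hs_def, List.findIdx_map]
      rfl
    rw [hcut_pair, hB]
    have hkgt_of : ∀ p : Nat, ∀ hpn : p < s.length, cutoff = s[p] → p < k := by
      intro p hpn hcutp
      by_contra hcon
      push_neg at hcon
      have hks : k < s.length := lt_of_le_of_lt hcon hpn
      have h1 := hyes hks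
      have h2 := hmono k p hcon hpn hks
      omega
    by_cases hN1 : 1 ≤ N
    · have hpl : (N - 1).toNat < s.length := by omega
      have hcutp : cutoff = s[(N - 1).toNat] := by
        rw [hcut_def]
        exact PySem.List.pyGetD_eq_getElem s 0 (by omega) (by omega)
      have hkgt : (N - 1).toNat < k := hkgt_of _ hpl hcutp
      have hkN : N ≤ (k : Int) := by omega
      by_cases hkn : k < r.length
      · have hsplit : PySem.List.pyRange N r.length 1
            = PySem.List.pyRange N (k : Int) 1 ++ PySem.List.pyRange (k : Int) r.length 1 :=
          PySem.List.pyRange_one_append N (k : Int) r.length (by omega) (by omega)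
        have hfirst : (PySem.List.pyRange N (k : Int) 1).find?
            (fun i => decide (PySem.List.pyGetD s i 0 < cutoff)) = none := by
          rw [List.find?_eq_none]
          intro x hx
          rw [PySem.List.mem_pyRange_one] at hx
          rw [PySem.List.pyGetD_eq_getElem s 0 (by omega) (by omega)]
          simpa using hnot x.toNat (by omega) (by omega)
        have hsecond : (PySem.List.pyRange (k : Int) r.length 1).find?
            (fun i => decide (PySem.List.pyGetD s i 0 < cutoff)) = some (k : Int) := by
          rw [PySem.List.pyRange_one_cons (by omega)]
          apply List.find?_cons_of_pos
          rw [PySem.List.pyGetD_eq_getElem s 0 (by omega) (by omega)]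
          simpa using hyes (by omega)
        rw [hsplit, List.find?_append, hfirst, hsecond, Option.none_or]
        dsimp only
        exact PySem.List.slice_to_natCast _ _
      · have hnone : (PySem.List.pyRange N r.length 1).find?
            (fun i => decide (PySem.List.pyGetD s i 0 < cutoff)) = none := by
          rw [List.find?_eq_none]
          intro x hx
          rw [PySem.List.mem_pyRange_one] at hx
          rw [PySem.List.pyGetD_eq_getElem s 0 (by omega) (by omega)]
          simpa using hnot x.toNat (by omega) (by omega)
        rw [hnone]
        dsimp only
        rw [List.take_of_length_le (by simp; omega)]
    · push_neg at hN1
      have h0N : N ≤ 0 := by omega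
      have hk0 : ((1 - N).toNat : Int) = 1 - N := by omega
      have hcutp : cutoff = s[s.length - (1 - N).toNat]'(by omega) := by
        rw [hcut_def, show N - 1 = -(((1 - N).toNat : Nat) : Int) by omega]
        exact PySem.List.pyGetD_neg_natCast s (1 - N).toNat 0 (by omega) (by omega)
      have hpn : s.length - (1 - N).toNat < s.length := by omega
      have hkgt : s.length - (1 - N).toNat < k := hkgt_of _ hpn hcutp
      have hkNn : (r.length : Int) + N ≤ (k : Int) := by omega
      have hneg : ∀ x : Int, ∀ hx1 : N ≤ x, ∀ hx2 : x < 0,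
          PySem.List.pyGetD s x 0 = s[(((s.length : Int) + x).toNat)]'(by omega) := by
        intro x hx1 hx2
        have h := PySem.List.pyGetD_neg_natCast s (-x).toNat 0 (by omega) (by omega)
        rw [show -((((-x).toNat : Nat)) : Int) = x by omega] at h
        rw [h]
        simp only [show s.length - (-x).toNat = ((s.length : Int) + x).toNat from by omega]
      by_cases hkn : k < r.length
      · have hi0lt : (k : Int) - r.length < 0 := by omega
        have hi0ge : N ≤ (k : Int) - r.length := by omega
        have hsplit : PySem.List.pyRange N r.length 1
            = (PySem.List.pyRange N ((k : Int) - r.length) 1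
                ++ PySem.List.pyRange ((k : Int) - r.length) 0 1)
              ++ PySem.List.pyRange 0 r.length 1 := by
          rw [← PySem.List.pyRange_one_append N ((k : Int) - r.length) 0 (by omega) (by omega),
            ← PySem.List.pyRange_one_append N 0 r.length (by omega) (by omega)]
        have hfirst : (PySem.List.pyRange N ((k : Int) - r.length) 1).find?
            (fun i => decide (PySem.List.pyGetD s i 0 < cutoff)) = none := by
          rw [List.find?_eq_none]
          intro x hx
          rw [PySem.List.mem_pyRange_one] at hx
          rw [hneg x (by omega) (by omega)]
          simpa using hnot ((((s.length : Int) + x).toNat)) (by omega) (by omega)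
        have hsecond : (PySem.List.pyRange ((k : Int) - r.length) 0 1).find?
            (fun i => decide (PySem.List.pyGetD s i 0 < cutoff)) = some ((k : Int) - r.length) := by
          rw [PySem.List.pyRange_one_cons (by omega)]
          apply List.find?_cons_of_pos
          rw [hneg ((k : Int) - r.length) (by omega) (by omega)]
          have hidx : (((s.length : Int) + ((k : Int) - r.length)).toNat) = k := by omega
          simp only [hidx, decide_eq_true_eq]
          exact hyes (by omega)
        rw [hsplit, List.find?_append, List.find?_append, hfirst, hsecond, Option.none_or,
          Option.some_or]
        dsimp only
        rw [show (k : Int) - r.length = -((((r.length - k : Nat)) : Nat) : Int) by omega,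
          PySem.List.slice_to_neg_natCast _ _ (by omega)]
        congr 1
        simp only [List.length_map]
        omega
      · have hnone : (PySem.List.pyRange N r.length 1).find?
            (fun i => decide (PySem.List.pyGetD s i 0 < cutoff)) = none := by
          rw [List.find?_eq_none]
          intro x hx
          rw [PySem.List.mem_pyRange_one] at hx
          by_cases hx0 : x < 0
          · rw [hneg x (by omega) hx0]
            simpa using hnot ((((s.length : Int) + x).toNat)) (by omega) (by omega)
          · rw [PySem.List.pyGetD_eq_getElem s 0 (by omega) (by omega)]
            simpa using hnot x.toNat (by omega) (by omega)
        rw [hnone]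
        dsimp only
        rw [List.take_of_length_le (by simp; omega)]

theorem lt_lex_bool (a b : Int × List Int) :
    (decide (a.1 < b.1) || (!decide (b.1 < a.1) && decide (a.2 < b.2)))
    = decide (toLex a < toLex b) := by
  rcases lt_trichotomy a.1 b.1 with h | h | h
  · simp [Prod.Lex.lt_iff, h, not_lt_of_gt, ne_of_lt h]
  · simp [Prod.Lex.lt_iff, h]
  · simp [Prod.Lex.lt_iff, h, not_lt_of_gt]

theorem sorted2_eq_sorted_toLex (xs : List (Int × List Int)) :
    PySem.List.sorted2 xs (fun x => x.1) (fun x => x.2) true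
    = PySem.List.sorted xs (fun x => toLex x) true := by
  rw [PySem.List.sorted_rev_eq_foldl_insertBy]
  unfold PySem.List.sorted2
  dsimp only
  congr 1
  funext acc x
  congr 1
  funext a b
  exact lt_lex_bool b a

theorem ranked_pairwise (xs : List (Int × List Int)) :
    (PySem.List.sorted2 xs (fun x => x.1) (fun x => x.2) true).Pairwise
      (fun a b => b.1 ≤ a.1) := by
  rw [sorted2_eq_sorted_toLex]
  have h := PySem.List.sorted_pairwise_rev xs (fun x => toLex x)
  refine h.imp ?_
  intro a b hab
  rcases Prod.Lex.le_iff.mp hab with h1 | h2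
  · exact le_of_lt h1
  · exact le_of_eq h2.1

-- the common sorted (score, peptide) list and cutoff
def rankedH (L : List (List Int)) (S : List Int) : List (Int × List Int) :=
  PySem.List.sorted2 (L.map (fun p => (scoreB (PySem.List.sorted S (fun x => x) false) p, p)))
    (fun x => x.1) (fun x => x.2) true

theorem rankedH_len (L : List (List Int)) (S : List Int) : (rankedH L S).length = L.length := by
  rw [rankedH, (PySem.List.sorted2_perm _ _ _ _).length_eq, List.length_map]

-- A, reduced to the common core
theorem Trim1_eq (L : List (List Int)) (S : List Int) (N : Int) (hpre : Pre_Trim1 L S N) :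
    Trim1 L S N
    = if N ≥ (L.length : Int) then (rankedH L S).map (fun x => x.2)
      else takeGeB ((PySem.List.pyGetD (rankedH L S) (N - 1) (0, [])).1) (rankedH L S) := by
  unfold Trim1
  dsimp only
  have hSL : (PySem.List.pyRange 0 (L.length : Int) 1).foldl
      (fun acc i => acc ++ [LinearScore1 (PySem.List.pyGetD L i []) S]) []
      = L.map (fun p => scoreB (PySem.List.sorted S (fun x => x) false) p) := by
    rw [PySem.List.foldl_append_singleton_eq_map, List.nil_append]
    have h1 : (PySem.List.pyRange 0 (L.length : Int) 1).map
        (fun i => LinearScore1 (PySem.List.pyGetD L i []) S)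
        = ((PySem.List.pyRange 0 (L.length : Int) 1).map
            (fun i => PySem.List.pyGetD L i [])).map (fun p => LinearScore1 p S) := by
      rw [List.map_map]
      rfl
    rw [h1]
    have h2 := PySem.List.map_pyGetD_pyRange_zero L ([] : List Int)
    rw [show PySem.List.pyRange 0 (PySem.List.len L) = PySem.List.pyRange 0 (L.length : Int) 1
        from rfl] at h2
    rw [h2]
    apply List.map_congr_left
    intro p _
    rw [scoreA_eq p S, scoreB_eq S p]
  rw [hSL]
  have hzip : (L.map (fun p => scoreB (PySem.List.sorted S (fun x => x) false) p)).zip L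
      = L.map (fun p => (scoreB (PySem.List.sorted S (fun x => x) false) p, p)) := by
    have h := List.zip_map' (f := fun p => scoreB (PySem.List.sorted S (fun x => x) false) p)
      (g := id) (l := L)
    rw [List.map_id] at h
    simpa only [id] using h
  rw [hzip]
  have hpair := ranked_pairwise (L.map (fun p => (scoreB (PySem.List.sorted S (fun x => x) false) p, p)))
  have hrlen := rankedH_len L S
  have hc := trim_core (rankedH L S) N hpair (by rw [hrlen]; exact hpre)
  have hcast : ((L.length : Nat) : Int) = (((rankedH L S).length : Nat) : Int) := by rw [hrlen]
  rw [hcast]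
  rw [show PySem.List.sorted2
      (L.map (fun p => (scoreB (PySem.List.sorted S (fun x => x) false) p, p)))
      (fun x => x.1) (fun x => x.2) true = rankedH L S from rfl]
  rw [hc, hrlen]

-- B, spelled out with the same core
theorem Trim1_alt_eq (L : List (List Int)) (S : List Int) (N : Int) :
    Trim1_alt L S N
    = if N ≥ (L.length : Int) then (rankedH L S).map (fun x => x.2)
      else if N ≤ 0 then []
      else ((rankedH L S).filter
          (fun sp => decide (sp.1 ≥ (PySem.List.pyGetD (rankedH L S) (N - 1) (0, [])).1))).map
        (fun x => x.2) := rfl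

-- ===== VERDICT (by name: the statements are the Claim_ definitions above) =====
theorem Trim1_spec : Claim_unchanged_Trim1 := by
  intro L S N _ hpre
  intro hnD
  rw [Trim1_eq L S N hpre, Trim1_alt_eq L S N]
  by_cases hN : N ≥ (L.length : Int)
  · rw [if_pos hN, if_pos hN]
  · rw [if_neg hN, if_neg hN]
    have hN1 : 1 ≤ N := by
      unfold D_Trim1 at hnD
      unfold Pre_Trim1 at hpre
      by_contra hcon
      exact hnD ⟨by omega, by rcases hpre with h | h <;> omega⟩
    rw [if_neg (by omega)]
    exact takeGeB_filter _ _ (ranked_pairwise _)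

theorem Trim1_changed : Claim_changed_Trim1 := by
  unfold Claim_changed_Trim1
  decide

theorem Trim1_tight : Claim_exact_Trim1 := by
  intro L S N _ hpre hD
  rcases hD with ⟨hN0, hNL⟩
  have hL1 : 1 ≤ L.length := by omega
  have hNlt : ¬ (N ≥ (L.length : Int)) := by
    push_neg
    omega
  rw [Trim1_eq L S N hpre, Trim1_alt_eq L S N, if_neg hNlt, if_neg hNlt, if_pos hN0]
  have hrlen := rankedH_len L S
  obtain ⟨a, rest, hr⟩ : ∃ a rest, rankedH L S = a :: rest := by
    cases hrk : rankedH L S with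
    | nil => rw [hrk] at hrlen; simp at hrlen; omega
    | cons a rest => exact ⟨a, rest, rfl⟩
  have hcut : PySem.List.pyGetD (rankedH L S) (N - 1) ((0 : Int), ([] : List Int))
      = (rankedH L S)[(rankedH L S).length - (1 - N).toNat]'(by omega) := by
    rw [show N - 1 = -(((1 - N).toNat : Nat) : Int) by omega]
    exact PySem.List.pyGetD_neg_natCast _ _ _ (by omega) (by omega)
  have hmem : PySem.List.pyGetD (rankedH L S) (N - 1) ((0 : Int), ([] : List Int))
      ∈ rankedH L S := by
    rw [hcut]
    exact List.getElem_mem _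
  have hp := ranked_pairwise (L.map (fun p => (scoreB (PySem.List.sorted S (fun x => x) false) p, p)))
  rw [show PySem.List.sorted2
      (L.map (fun p => (scoreB (PySem.List.sorted S (fun x => x) false) p, p)))
      (fun x => x.1) (fun x => x.2) true = rankedH L S from rfl] at hp
  have hall : ∀ z ∈ rankedH L S, z.1 ≤ a.1 := by
    intro z hz
    rw [hr] at hz hp
    rcases List.mem_cons.mp hz with he | hm
    · rw [he]
    · exact List.rel_of_pairwise_cons hp hm
  have hle := hall _ hmem
  obtain ⟨s, p⟩ := a
  rw [hr] at hle ⊢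
  rw [takeGeB, if_neg (not_lt.mpr hle)]
  simp
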